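-- pv_equiv track=rewrite | github.com/Warren0308/spammingDetection | backup.py | len_calcul
-- ===== SOURCE A (Python) =====
-- def len_calcul(text):
--     l_content = len(text)
--     length_thresholds = [(6, "first"), (8, "second"), (10, "third"), (12, "fourth"),
--                          (16, "fifth"), (20, "sixth"), (24, "seventh"), (28, "eighth"),
--                          (32, "ninth"), (float('inf'), "tenth")]
--     for threshold, flag in length_thresholds:
--         if l_content <= threshold:
--             return flag
--     return False
-- ===== SOURCE B (Python) =====
-- def len_calcul(text):
--     thresholds = [6, 8, 10, 12, 16, 20, 24, 28, 32]
--     labels = ["first", "second", "third", "fourth", "fifth",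
--               "sixth", "seventh", "eighth", "ninth", "tenth"]
--     l = len(text)
--     lo, hi = 0, len(thresholds)
--     while lo < hi:
--         mid = (lo + hi) // 2
--         if thresholds[mid] < l:
--             lo = mid + 1
--         else:
--             hi = mid
--     return labels[lo]
-- ===== Notes on version B (the rewrite author's own statement) =====
-- stated objective: alternative
-- what changed: Replaces the linear scan over (threshold,label) pairs carrying an unreachable False fallback with a hand-written binary search (bisect_left) over a sorted threshold table indexing a parallel label list.
import Mathlib
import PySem

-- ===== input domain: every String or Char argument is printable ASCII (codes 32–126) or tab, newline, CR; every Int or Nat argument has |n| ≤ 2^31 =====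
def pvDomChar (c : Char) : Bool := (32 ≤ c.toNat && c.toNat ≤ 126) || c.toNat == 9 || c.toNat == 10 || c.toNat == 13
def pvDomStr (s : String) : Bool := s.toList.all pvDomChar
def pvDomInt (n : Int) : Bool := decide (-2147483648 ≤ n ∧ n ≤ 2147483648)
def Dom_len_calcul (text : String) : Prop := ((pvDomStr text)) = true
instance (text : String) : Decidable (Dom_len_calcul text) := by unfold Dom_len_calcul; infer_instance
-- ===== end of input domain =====

-- B replaces A's linear scan over (threshold,label) pairs by a binary search (bisect_left) into a sorted threshold table with a parallel label list.

-- ===== PORT A =====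
-- threshold `none` stands for Python's float('inf'): l <= inf is always true.
def lenScanA : List (Option Int × String) → Int → String
  | [], _ => ""  -- Python's `return False` fallback; unreachable (last threshold is inf)
  | (some k, flag) :: rest, l => if l ≤ k then flag else lenScanA rest l
  | (none, flag) :: _, _ => flag  -- l <= float('inf') always holds

def len_calcul (text : String) : String :=
  let l_content : Int := PySem.Str.len text
  lenScanA [(some 6, "first"), (some 8, "second"), (some 10, "third"), (some 12, "fourth"),
            (some 16, "fifth"), (some 20, "sixth"), (some 24, "seventh"), (some 28, "eighth"),
            (some 32, "ninth"), (none, "tenth")] l_content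

-- ===== PORT B =====
-- bisect_left loop of Source B; terminates since hi - lo shrinks.
-- fuel = hi - lo bounds the loop's iterations (hi - lo shrinks each step), so the fuel never runs out
def lenBisectGo : Nat → List Int → Int → Nat → Nat → Nat
  | 0, _, _, lo, _ => lo
  | fuel + 1, thr, l, lo, hi =>
      if lo < hi then
        let mid := (lo + hi) / 2
        if thr.getD mid 0 < l then lenBisectGo fuel thr l (mid + 1) hi
        else lenBisectGo fuel thr l lo mid
      else lo

def lenBisect (thr : List Int) (l : Int) (lo hi : Nat) : Nat :=
  lenBisectGo (hi - lo) thr l lo hi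

def len_calcul_alt (text : String) : String :=
  let thresholds : List Int := [6, 8, 10, 12, 16, 20, 24, 28, 32]
  let labels : List String := ["first", "second", "third", "fourth", "fifth",
                               "sixth", "seventh", "eighth", "ninth", "tenth"]
  let l : Int := PySem.Str.len text
  -- labels[lo]: lo ≤ 9 always, so the Python indexing never raises; getD is exact here
  labels.getD (lenBisect thresholds l 0 thresholds.length) ""

-- ===== PRECONDITION & SPEC =====
def Spec_len_calcul (text : String) (out : String) : Prop := out = len_calcul_alt text
instance (text : String) (out : String) : Decidable (Spec_len_calcul text out) := by unfold Spec_len_calcul; infer_instance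

-- ===== CLAIM (what is proved, stated in full; the proofs are below) =====
def Claim_equal_len_calcul : Prop := ∀ (text : String), Dom_len_calcul text → Spec_len_calcul text (len_calcul text)

-- ===== LEMMAS AND PROOFS =====
theorem lenBisectGo_congr (fuel : Nat) (thr : List Int) (l1 l2 : Int)
    (h : ∀ m, (thr.getD m 0 < l1 ↔ thr.getD m 0 < l2)) :
    ∀ lo hi, lenBisectGo fuel thr l1 lo hi = lenBisectGo fuel thr l2 lo hi := by
  induction fuel with
  | zero => intro lo hi; rfl
  | succ f ih =>
      intro lo hi
      by_cases hlo : lo < hi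
      · simp only [lenBisectGo, if_pos hlo]
        by_cases hc : thr.getD ((lo + hi) / 2) 0 < l1
        · rw [if_pos hc, if_pos ((h _).1 hc)]; exact ih _ _
        · rw [if_neg hc, if_neg (fun hx => hc ((h _).2 hx))]; exact ih _ _
      · simp only [lenBisectGo, if_neg hlo]

theorem lenBisect_big {l : Int} (h : 32 < l) :
    lenBisect [6, 8, 10, 12, 16, 20, 24, 28, 32] l 0 9 = 9 := by
  have hb : ∀ m : Nat, (List.getD [(6:Int), 8, 10, 12, 16, 20, 24, 28, 32] m 0 < l
      ↔ List.getD [(6:Int), 8, 10, 12, 16, 20, 24, 28, 32] m 0 < 33) := by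
    intro m
    have hle : List.getD [(6:Int), 8, 10, 12, 16, 20, 24, 28, 32] m 0 ≤ 32 := by
      rcases m with _|_|_|_|_|_|_|_|_|m <;> simp [List.getD]
    omega
  unfold lenBisect
  rw [lenBisectGo_congr 9 _ l 33 hb]
  decide

theorem len_agree (n : Nat) :
    lenScanA [(some 6, "first"), (some 8, "second"), (some 10, "third"), (some 12, "fourth"),
              (some 16, "fifth"), (some 20, "sixth"), (some 24, "seventh"), (some 28, "eighth"),
              (some 32, "ninth"), (none, "tenth")] (n : Int)
      = List.getD ["first", "second", "third", "fourth", "fifth",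
                   "sixth", "seventh", "eighth", "ninth", "tenth"]
          (lenBisect [6, 8, 10, 12, 16, 20, 24, 28, 32] (n : Int) 0 9) "" := by
  by_cases h : n ≤ 32
  · interval_cases n <;> decide
  · have h32 : (32 : Int) < (n : Int) := by exact_mod_cast by omega
    rw [lenBisect_big h32]
    simp only [lenScanA]
    repeat rw [if_neg (by omega)]
    rfl

-- ===== VERDICT (by name: the statement is the Claim_ definition above) =====
theorem len_calcul_spec : Claim_equal_len_calcul := by
  intro text _
  unfold Spec_len_calcul len_calcul len_calcul_alt
  simp only [PySem.Str.len_eq]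
  exact len_agree text.length
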